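-- pv_equiv track=rewrite | github.com/neurodesk/neurocontainers | recipes/musclemap/musclemap.py | _find_metrics_label_field
-- ===== SOURCE A (Python) =====
-- def _find_metrics_label_field(fieldnames):
--     lower_map = {field.lower().strip(): field for field in fieldnames}
--     for candidate in ("label", "label_name", "name", "muscle", "structure", "anatomy", "region"):
--         if candidate in lower_map:
--             return lower_map[candidate]
--     for field in fieldnames:
--         lowered = field.lower()
--         if "label" in lowered or "muscle" in lowered or "anatomy" in lowered:
--             return field
--     return fieldnames[0] if fieldnames else ""
-- ===== SOURCE B (Python) =====
-- _CANDIDATES = ("label", "label_name", "name", "muscle", "structure", "anatomy", "region")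
--
--
-- def _rank(field):
--     """Priority of a field: exact candidate index, 7 for a substring hit, 8 otherwise."""
--     key = field.lower().strip()
--     for i, candidate in enumerate(_CANDIDATES):
--         if key == candidate:
--             return i
--     lowered = field.lower()
--     if "label" in lowered or "muscle" in lowered or "anatomy" in lowered:
--         return 7
--     return 8
--
--
-- def _find_metrics_label_field(fieldnames):
--     best_rank, best = 9, ""
--     for field in fieldnames:
--         r = _rank(field)
--         if r < best_rank:
--             best_rank, best = r, field
--     return best
-- ===== Notes on version B (the rewrite author's own statement) =====
-- stated objective: alternative
-- what changed: B makes a single pass computing a priority rank per field (candidate index 0-6, substring hit 7, default 8) and keeps the first field of minimal rank, instead of A's build-a-lowered-key-dict then staged candidate/fallback/default passes; Pre_ excludes lists with two distinct fields whose lowered+stripped forms coincide on a candidate name, where A's dict last-wins choice is an accidental first-vs-last tie.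
-- outside the precondition, e.g. on _find_metrics_label_field(['Label', 'label ']): A returns 'label ', B returns 'Label'
import Mathlib
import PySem

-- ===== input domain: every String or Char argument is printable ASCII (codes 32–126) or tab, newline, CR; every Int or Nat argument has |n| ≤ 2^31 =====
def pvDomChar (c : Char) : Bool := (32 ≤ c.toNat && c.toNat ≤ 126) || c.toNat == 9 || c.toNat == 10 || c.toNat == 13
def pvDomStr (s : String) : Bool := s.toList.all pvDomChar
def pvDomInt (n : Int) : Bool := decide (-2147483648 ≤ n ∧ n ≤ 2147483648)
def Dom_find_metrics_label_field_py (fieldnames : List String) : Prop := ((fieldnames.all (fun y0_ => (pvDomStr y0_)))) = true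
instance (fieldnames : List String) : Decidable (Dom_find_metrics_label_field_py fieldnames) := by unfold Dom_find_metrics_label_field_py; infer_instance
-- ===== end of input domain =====

-- B replaces A's lowered-key dict plus staged candidate/fallback/default passes by one
-- pass keeping the first field of minimal priority rank (alternative decomposition, same cost).

-- ===== PORT A =====
def pvCandidates : List String :=
  ["label", "label_name", "name", "muscle", "structure", "anatomy", "region"]

def pvLowerStrip (f : String) : String := PySem.Str.strip (PySem.Str.lower f)

-- lower_map = {field.lower().strip(): field for field in fieldnames}
def pvLowerMapA (fieldnames : List String) : PySem.Dict String String :=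
  fieldnames.foldl (fun d f => d.insert (pvLowerStrip f) f) PySem.Dict.empty

-- first for-loop: candidate lookup in lower_map
def pvCandLoopA (d : PySem.Dict String String) : List String → Option String
  | [] => none
  | c :: cs =>
    match d.get? c with
    | some v => some v
    | none => pvCandLoopA d cs

-- second for-loop: substring fallback
def pvFallbackA : List String → Option String
  | [] => none
  | f :: fs =>
    let lowered := PySem.Str.lower f
    if PySem.Str.isIn "label" lowered || PySem.Str.isIn "muscle" lowered
        || PySem.Str.isIn "anatomy" lowered then some f
    else pvFallbackA fs

def find_metrics_label_field_py (fieldnames : List String) : String :=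
  match pvCandLoopA (pvLowerMapA fieldnames) pvCandidates with
  | some v => v
  | none =>
    match pvFallbackA fieldnames with
    | some v => v
    | none => match fieldnames with
              | [] => ""
              | f :: _ => f

-- ===== PORT B =====
-- the enumerate loop of _rank: index of key in the candidate list
def pvRankLoop (key : String) (i : Nat) : List String → Option Nat
  | [] => none
  | c :: cs => if key == c then some i else pvRankLoop key (i + 1) cs

-- _rank(field): candidate index, 7 for a substring hit, 8 otherwise
def pvRank (field : String) : Nat :=
  let key := PySem.Str.strip (PySem.Str.lower field)
  match pvRankLoop key 0 pvCandidates with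
  | some i => i
  | none =>
    let lowered := PySem.Str.lower field
    if PySem.Str.isIn "label" lowered || PySem.Str.isIn "muscle" lowered
        || PySem.Str.isIn "anatomy" lowered then 7 else 8

def find_metrics_label_field_py_alt (fieldnames : List String) : String :=
  (fieldnames.foldl
    (fun s f => if pvRank f < s.1 then (pvRank f, f) else s)
    ((9 : Nat), "")).2

-- ===== PRECONDITION & SPEC =====
-- Pre_ excludes lists containing two DISTINCT fields whose lowercased+stripped forms coincide
-- and equal one of the candidate names: there A's dict-reinsertion last-wins pick is an
-- accidental first-vs-last tie on duplicate keys, and B keeps the first such field.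
def Pre_find_metrics_label_field_py (fieldnames : List String) : Prop :=
  List.Pairwise (fun a b =>
    PySem.Str.strip (PySem.Str.lower a) = PySem.Str.strip (PySem.Str.lower b) →
    PySem.Str.strip (PySem.Str.lower a) ∈
      (["label", "label_name", "name", "muscle", "structure", "anatomy", "region"] : List String) →
    a = b) fieldnames
instance (fieldnames : List String) : Decidable (Pre_find_metrics_label_field_py fieldnames) := by
  unfold Pre_find_metrics_label_field_py; infer_instance

def pvWitness_find_metrics_label_field_py : List String := ["Muscle Name", "value"]

def Spec_find_metrics_label_field_py (fieldnames : List String) (out : String) : Prop := out = find_metrics_label_field_py_alt fieldnames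
instance (fieldnames : List String) (out : String) : Decidable (Spec_find_metrics_label_field_py fieldnames out) := by unfold Spec_find_metrics_label_field_py; infer_instance

-- ===== CLAIM (what is proved, stated in full; the proofs are below) =====
def Claim_equal_find_metrics_label_field_py : Prop := ∀ (fieldnames : List String), Dom_find_metrics_label_field_py fieldnames → Pre_find_metrics_label_field_py fieldnames → Spec_find_metrics_label_field_py fieldnames (find_metrics_label_field_py fieldnames)

-- ===== LEMMAS AND PROOFS =====

-- proof-side: last field of l whose lowered+stripped form is c (what the dict stores at c)
def pvLastMatch (l : List String) (c : String) : Option String :=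
  l.foldl (fun acc f => if pvLowerStrip f == c then some f else acc) none

-- proof-side: A's candidate loop rephrased through pvLastMatch
def pvCandScan (l : List String) : List String → Option String
  | [] => none
  | c :: cs =>
    match pvLastMatch l c with
    | some v => some v
    | none => pvCandScan l cs

-- proof-side: predicate of A's fallback test
def pvSubst (f : String) : Bool :=
  PySem.Str.isIn "label" (PySem.Str.lower f) || PySem.Str.isIn "muscle" (PySem.Str.lower f)
    || PySem.Str.isIn "anatomy" (PySem.Str.lower f)

-- proof-side: minimal rank of the list (9 on empty)
def pvMinr (l : List String) : Nat := l.foldr (fun f m => min (pvRank f) m) 9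


-- === A-side conversion: dict lookup is the last-match scan; staged loops in scan/find? form ===

theorem pvGet_foldl_insert (fs : List String) (d : PySem.Dict String String) (c : String) :
    (fs.foldl (fun d f => d.insert (pvLowerStrip f) f) d).get? c
      = fs.foldl
          (fun acc f => if pvLowerStrip f == c then some f else acc)
          (d.get? c) := by
  induction fs generalizing d with
  | nil => rfl
  | cons f fs ih =>
    rw [List.foldl_cons, List.foldl_cons, ih]
    have hacc : (d.insert (pvLowerStrip f) f).get? c
        = if pvLowerStrip f == c then some f else d.get? c := by
      rw [PySem.Dict.get?_insert]
      by_cases h : pvLowerStrip f = c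
      · rw [if_pos h.symm, if_pos (beq_iff_eq.mpr h)]
      · rw [if_neg (fun hc => h hc.symm), if_neg (by simpa using h)]
    rw [hacc]

theorem pvGet_lowerMap (fs : List String) (c : String) :
    (pvLowerMapA fs).get? c = pvLastMatch fs c := by
  unfold pvLowerMapA pvLastMatch
  rw [pvGet_foldl_insert]
  rfl

theorem pvCandA_eq (l : List String) (cs : List String) :
    pvCandLoopA (pvLowerMapA l) cs = pvCandScan l cs := by
  induction cs with
  | nil => rfl
  | cons c cs ih => simp only [pvCandLoopA, pvCandScan, pvGet_lowerMap, ih]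

theorem pvFallback_eq_find (l : List String) : pvFallbackA l = l.find? pvSubst := by
  induction l with
  | nil => rfl
  | cons f fs ih =>
    cases hs : pvSubst f
    · rw [List.find?_cons_of_neg (by simp [hs])]
      simp only [pvFallbackA]
      rw [if_neg (by simpa [pvSubst] using hs), ih]
    · rw [List.find?_cons_of_pos hs]
      simp only [pvFallbackA]
      rw [if_pos (by simpa [pvSubst] using hs)]

-- === the candidate-index loop of _rank ===

theorem pvRankLoop_some (k : String) (cs : List String) :
    ∀ (i j : Nat), pvRankLoop k i cs = some j →
      ∃ m, m < cs.length ∧ j = i + m ∧ cs[m]? = some k := by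
  induction cs with
  | nil => intro i j h; simp [pvRankLoop] at h
  | cons c cs ih =>
    intro i j h
    simp only [pvRankLoop] at h
    by_cases hk : k == c
    · rw [if_pos hk] at h
      injection h with h'
      refine ⟨0, by simp, by omega, ?_⟩
      simp [(beq_iff_eq.mp hk).symm]
    · rw [if_neg hk] at h
      obtain ⟨m, hm, hj, hg⟩ := ih (i + 1) j h
      exact ⟨m + 1, by simpa using hm, by omega, by simpa using hg⟩

theorem pvRankLoop_le (k : String) (cs : List String) :
    ∀ (i m : Nat), cs[m]? = some k →
      ∃ j, pvRankLoop k i cs = some j ∧ j ≤ i + m := by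
  induction cs with
  | nil => intro i m h; simp at h
  | cons c cs ih =>
    intro i m h
    simp only [pvRankLoop]
    by_cases hk : k == c
    · exact ⟨i, by rw [if_pos hk], by omega⟩
    · cases m with
      | zero =>
        simp at h
        exact absurd (beq_iff_eq.mpr h.symm) hk
      | succ m' =>
        obtain ⟨j, hj, hle⟩ := ih (i + 1) m' (by simpa using h)
        exact ⟨j, by rw [if_neg hk]; exact hj, by omega⟩

-- === pvRank facts ===

theorem pvRank_def (f : String) :
    pvRank f = match pvRankLoop (pvLowerStrip f) 0 pvCandidates with
      | some i => i
      | none => if pvSubst f then 7 else 8 := by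
  unfold pvRank pvLowerStrip pvSubst
  dsimp only

theorem pvRank_le8 (f : String) : pvRank f ≤ 8 := by
  rw [pvRank_def]
  cases h : pvRankLoop (pvLowerStrip f) 0 pvCandidates with
  | none => dsimp; split <;> omega
  | some j =>
    obtain ⟨m, hm, hj, _⟩ := pvRankLoop_some _ _ 0 j h
    have hlen : pvCandidates.length = 7 := rfl
    dsimp; omega

theorem pvRank_lt7_key {f : String} {r : Nat} (h : pvRank f = r) (hr : r < 7) :
    pvCandidates[r]? = some (pvLowerStrip f) := by
  rw [pvRank_def] at h
  cases hl : pvRankLoop (pvLowerStrip f) 0 pvCandidates with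
  | none => rw [hl] at h; dsimp at h; split at h <;> omega
  | some j =>
    rw [hl] at h; dsimp at h
    obtain ⟨m, hm, hj, hg⟩ := pvRankLoop_some _ _ 0 j hl
    have : m = r := by omega
    rwa [this] at hg

theorem pvRank_le_of_key {f : String} {m : Nat}
    (h : pvCandidates[m]? = some (pvLowerStrip f)) : pvRank f ≤ m := by
  obtain ⟨j, hj, hle⟩ := pvRankLoop_le _ _ 0 m h
  rw [pvRank_def, hj]; dsimp only; omega

theorem pvRank_ge7_subst {f : String} (h : 7 ≤ pvRank f) :
    pvRank f = if pvSubst f then 7 else 8 := by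
  rw [pvRank_def] at h ⊢
  cases hl : pvRankLoop (pvLowerStrip f) 0 pvCandidates with
  | none => rfl
  | some j =>
    rw [hl] at h; dsimp at h
    obtain ⟨m, hm, hj, _⟩ := pvRankLoop_some _ _ 0 j hl
    have hlen : pvCandidates.length = 7 := rfl
    omega

-- === pvMinr facts ===

theorem pvMinr_cons (f : String) (fs : List String) :
    pvMinr (f :: fs) = min (pvRank f) (pvMinr fs) := rfl

theorem pvMinr_le {l : List String} {f : String} (h : f ∈ l) : pvMinr l ≤ pvRank f := by
  induction l with
  | nil => cases h
  | cons g gs ih =>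
    rw [pvMinr_cons]
    rcases List.mem_cons.mp h with rfl | h'
    · omega
    · have := ih h'; omega

theorem pvMinr_achiever {l : List String} (h : l ≠ []) :
    ∃ u ∈ l, pvRank u = pvMinr l := by
  induction l with
  | nil => exact absurd rfl h
  | cons f fs ih =>
    cases fs with
    | nil =>
      refine ⟨f, List.mem_cons_self, ?_⟩
      rw [pvMinr_cons]
      have := pvRank_le8 f
      show pvRank f = min (pvRank f) 9
      omega
    | cons g gs =>
      obtain ⟨u, hu, hru⟩ := ih (by simp)
      rw [pvMinr_cons]
      by_cases hle : pvRank f ≤ pvMinr (g :: gs)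
      · exact ⟨f, List.mem_cons_self, by omega⟩
      · exact ⟨u, List.mem_cons_of_mem _ hu, by omega⟩

theorem pvFind_min_some {l : List String} (h : l ≠ []) :
    ∃ u, l.find? (fun f => pvRank f == pvMinr l) = some u := by
  obtain ⟨u, hu, hru⟩ := pvMinr_achiever h
  exact Option.isSome_iff_exists.mp (List.find?_isSome.mpr ⟨u, hu, by simp [hru]⟩)

-- === pvLastMatch facts ===

theorem pvLM_none {l : List String} {c : String}
    (h : ∀ f ∈ l, pvLowerStrip f ≠ c) : pvLastMatch l c = none := by
  unfold pvLastMatch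
  induction l with
  | nil => rfl
  | cons f fs ih =>
    rw [List.foldl_cons, if_neg (by simpa using h f List.mem_cons_self)]
    exact ih (fun g hg => h g (List.mem_cons_of_mem _ hg))

theorem pvLM_from_some {l : List String} {c u : String}
    (h : ∀ f ∈ l, pvLowerStrip f = c → f = u) :
    l.foldl (fun acc f => if pvLowerStrip f == c then some f else acc) (some u) = some u := by
  induction l with
  | nil => rfl
  | cons f fs ih =>
    rw [List.foldl_cons]
    by_cases hf : pvLowerStrip f = c
    · rw [if_pos (beq_iff_eq.mpr hf), h f List.mem_cons_self hf]
      exact ih (fun g hg => h g (List.mem_cons_of_mem _ hg))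
    · rw [if_neg (by simpa using hf)]
      exact ih (fun g hg => h g (List.mem_cons_of_mem _ hg))

theorem pvLM_some {l : List String} {c u : String} (hu : u ∈ l) (hk : pvLowerStrip u = c)
    (huniq : ∀ f ∈ l, pvLowerStrip f = c → f = u) : pvLastMatch l c = some u := by
  unfold pvLastMatch
  induction l with
  | nil => cases hu
  | cons f fs ih =>
    rw [List.foldl_cons]
    by_cases hf : pvLowerStrip f = c
    · rw [if_pos (beq_iff_eq.mpr hf), huniq f List.mem_cons_self hf]
      exact pvLM_from_some (fun g hg => huniq g (List.mem_cons_of_mem _ hg))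
    · rw [if_neg (by simpa using hf)]
      have hufs : u ∈ fs := by
        rcases List.mem_cons.mp hu with rfl | h'
        · exact absurd hk hf
        · exact h'
      exact ih hufs (fun g hg => huniq g (List.mem_cons_of_mem _ hg))

-- === pvCandScan facts ===

theorem pvCandScan_none {l : List String} {cs : List String}
    (h : ∀ c ∈ cs, pvLastMatch l c = none) : pvCandScan l cs = none := by
  induction cs with
  | nil => rfl
  | cons c cs ih =>
    simp only [pvCandScan, h c List.mem_cons_self]
    exact ih (fun c' hc' => h c' (List.mem_cons_of_mem _ hc'))

theorem pvCandScan_at (l : List String) (u : String) :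
    ∀ (cs : List String) (r : Nat), r < cs.length →
      (∀ i, i < r → ∀ c, cs[i]? = some c → pvLastMatch l c = none) →
      (∀ c, cs[r]? = some c → pvLastMatch l c = some u) →
      pvCandScan l cs = some u := by
  intro cs
  induction cs with
  | nil => intro r hr; simp at hr
  | cons c cs ih =>
    intro r hr hnone hsome
    cases r with
    | zero =>
      simp only [pvCandScan, hsome c (by simp)]
    | succ r' =>
      have h0 : pvLastMatch l c = none := hnone 0 (by omega) c (by simp)
      simp only [pvCandScan, h0]
      exact ih r' (by simpa using hr)
        (fun i hi c' hc' => hnone (i + 1) (by omega) c' (by simpa using hc'))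
        (fun c' hc' => hsome c' (by simpa using hc'))

-- === find? congruence on members ===

theorem pvFind?_congr {l : List String} {p q : String → Bool}
    (h : ∀ x ∈ l, p x = q x) : l.find? p = l.find? q := by
  induction l with
  | nil => rfl
  | cons a l ih =>
    cases ha : q a
    · rw [List.find?_cons_of_neg (by simp [h a List.mem_cons_self, ha]),
        List.find?_cons_of_neg (by simp [ha])]
      exact ih (fun x hx => h x (List.mem_cons_of_mem _ hx))
    · rw [List.find?_cons_of_pos (by simp [h a List.mem_cons_self, ha]),
        List.find?_cons_of_pos ha]

-- === characterisation of B's single-pass fold ===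

theorem pvFoldB_char (l : List String) :
    ∀ (br : Nat) (b : String), br ≤ 9 →
      l.foldl (fun s f => if pvRank f < s.1 then (pvRank f, f) else s) (br, b)
        = if pvMinr l < br
            then (pvMinr l, (l.find? (fun f => pvRank f == pvMinr l)).getD b)
            else (br, b) := by
  induction l with
  | nil =>
    intro br b hbr
    rw [List.foldl_nil, if_neg (by show ¬ (9 < br); omega)]
  | cons f fs ih =>
    intro br b hbr
    have hf8 := pvRank_le8 f
    rw [List.foldl_cons]
    by_cases hfb : pvRank f < (br, b).1
    · rw [if_pos hfb, ih (pvRank f) f (by simp at hfb; omega)]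
      simp only at hfb
      by_cases hm : pvMinr fs < pvRank f
      · have hmin : pvMinr (f :: fs) = pvMinr fs := by rw [pvMinr_cons]; omega
        rw [if_pos hm, hmin, if_pos (by omega)]
        have hfs : fs ≠ [] := by
          intro e; rw [e] at hm; simp [pvMinr] at hm; omega
        obtain ⟨v, hv⟩ := pvFind_min_some hfs
        rw [List.find?_cons_of_neg (by simp; omega), hv]
        rfl
      · have hmin : pvMinr (f :: fs) = pvRank f := by rw [pvMinr_cons]; omega
        rw [if_neg hm, hmin, if_pos hfb,
          List.find?_cons_of_pos (by simp)]
        rfl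
    · simp only at hfb
      rw [if_neg (by simpa using hfb), ih br b hbr]
      by_cases hm2 : pvMinr fs < br
      · have hmin : pvMinr (f :: fs) = pvMinr fs := by rw [pvMinr_cons]; omega
        rw [if_pos hm2, hmin, if_pos hm2,
          List.find?_cons_of_neg (by simp; omega)]
      · have : ¬ pvMinr (f :: fs) < br := by rw [pvMinr_cons]; omega
        rw [if_neg hm2, if_neg this]


theorem pvA_scan (l : List String) :
    find_metrics_label_field_py l
      = (match pvCandScan l pvCandidates with
         | some v => v
         | none =>
           match pvFallbackA l with
           | some v => v
           | none => match l with | [] => "" | f :: _ => f) := by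
  unfold find_metrics_label_field_py
  rw [pvCandA_eq]

-- ===== VERDICT (by name: the statement is the Claim_ definition above) =====
theorem find_metrics_label_field_py_spec : Claim_equal_find_metrics_label_field_py := by
  intro l _ hpre
  unfold Spec_find_metrics_label_field_py
  have hsymm : Symmetric (fun a b : String =>
      pvLowerStrip a = pvLowerStrip b → pvLowerStrip a ∈ pvCandidates → a = b) := by
    intro x y hR heq hmem
    exact (hR heq.symm (heq ▸ hmem)).symm
  have huniq : ∀ a ∈ l, ∀ b ∈ l,
      pvLowerStrip a = pvLowerStrip b → pvLowerStrip a ∈ pvCandidates → a = b := by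
    intro a ha b hb heq hmem
    by_cases hab : a = b
    · exact hab
    · exact List.Pairwise.forall hsymm hpre ha hb hab heq hmem
  have hA := pvA_scan l
  by_cases hnil : l = []
  · subst hnil; rw [hA]; rfl
  · obtain ⟨u, hfind⟩ := pvFind_min_some hnil
    have hu_mem : u ∈ l := List.mem_of_find?_eq_some hfind
    have hu_rank : pvRank u = pvMinr l := by
      have := List.find?_some hfind; simpa using this
    have hm8 : pvMinr l ≤ 8 := hu_rank ▸ pvRank_le8 u
    have halt : find_metrics_label_field_py_alt l = u := by
      show (l.foldl (fun s f => if pvRank f < s.1 then (pvRank f, f) else s) (9, "")).2 = u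
      rw [pvFoldB_char l 9 "" (le_refl 9), if_pos (by omega), hfind]
      rfl
    rw [halt, hA]
    have hlen : pvCandidates.length = 7 := rfl
    rcases lt_or_ge (pvMinr l) 7 with h7 | h7
    · -- minimal rank is a candidate index
      have hkey : pvCandidates[pvMinr l]? = some (pvLowerStrip u) :=
        pvRank_lt7_key hu_rank h7
      have hscan : pvCandScan l pvCandidates = some u := by
        apply pvCandScan_at l u pvCandidates (pvMinr l) (by omega)
        · intro i hi c hc
          apply pvLM_none
          intro f hf hfc
          have h1 : pvRank f ≤ i := pvRank_le_of_key (hfc ▸ hc)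
          have h2 := pvMinr_le hf
          omega
        · intro c hc
          have hcu : c = pvLowerStrip u := by
            have h' := hc.symm.trans hkey
            injection h'

          subst hcu
          apply pvLM_some hu_mem rfl
          intro f hf hfk
          refine huniq f hf u hu_mem hfk ?_
          rw [hfk]
          exact List.mem_of_getElem? hkey
      rw [hscan]
    · -- no candidate matches anywhere
      have hscan : pvCandScan l pvCandidates = none := by
        apply pvCandScan_none
        intro c hc
        apply pvLM_none
        intro f hf hfc
        obtain ⟨i, hi⟩ := List.mem_iff_getElem?.mp hc
        have h1 : pvRank f ≤ i := pvRank_le_of_key (hfc ▸ hi)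
        have h2 : i < 7 := by
          obtain ⟨h2', -⟩ := List.getElem?_eq_some_iff.mp hi
          omega
        have h3 := pvMinr_le hf
        omega
      rw [hscan]
      rcases (by omega : pvMinr l = 7 ∨ pvMinr l = 8) with h | h
      · -- minimal rank 7: the fallback fires, on the same first field
        have hfb : pvFallbackA l = some u := by
          rw [pvFallback_eq_find,
            pvFind?_congr (q := fun f => pvRank f == pvMinr l) ?_, hfind]
          intro f hf
          have h3 := pvMinr_le hf
          have h4 := pvRank_ge7_subst (f := f) (by omega)
          cases hs : pvSubst f <;> rw [hs] at h4 <;> simp [h4, h]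
        rw [hfb]
      · -- minimal rank 8: nothing matches, both take the head
        have hfb : pvFallbackA l = none := by
          rw [pvFallback_eq_find]
          apply List.find?_eq_none.mpr
          intro f hf hs
          have h3 := pvMinr_le hf
          have h4 := pvRank_ge7_subst (f := f) (by omega)
          rw [hs] at h4
          simp at h4
          omega
        rw [hfb]
        obtain ⟨f0, fs0, rfl⟩ := List.exists_cons_of_ne_nil hnil
        have hr0 : pvRank f0 = pvMinr (f0 :: fs0) := by
          have h5 := pvMinr_le (List.mem_cons_self (a := f0) (l := fs0))
          have h6 := pvRank_le8 f0
          omega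
        rw [List.find?_cons_of_pos (by simp [hr0])] at hfind
        injection hfind
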